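-- pv_equiv track=rewrite | github.com/XavBertrand/ASR_jetson | src/asr_jetson/postprocessing/meeting_report.py | _ensure_table_spacing
-- ===== SOURCE A (Python) =====
-- from typing import Any, Dict, List, Optional, Set, Tuple
--
-- def _ensure_table_spacing(text: str) -> str:
--     """
--     Ajoute des lignes vides avant et après les blocs de tableaux Markdown
--     pour éviter les rendus cassés dans les exports pandoc/LaTeX.
--     """
--     lines = text.splitlines()
--     out: List[str] = []
--     in_table = False
--
--     for idx, line in enumerate(lines):
--         stripped = line.strip()
--         is_table_line = stripped.startswith("|")
--
--         if is_table_line: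
--             if not in_table:
--                 if out and out[-1].strip():
--                     out.append("")
--                 in_table = True
--             out.append(line.rstrip())
--             continue
--
--         if in_table:
--             if stripped and out and out[-1].strip():
--                 out.append("")
--             in_table = False
--
--         out.append(line.rstrip())
--
--     return "\n".join(out)
-- ===== SOURCE B (Python) =====
-- def _ensure_table_spacing(text: str) -> str:
--     """Two-stage block algorithm: first group the lines into maximal runs
--     ("blocks") of table / non-table lines, then emit the blocks, inserting a
--     blank line at each block boundary whose non-table side is non-blank."""
--     def is_table(line):
--         return line.strip().startswith("|")
--
--     # stage 1: group consecutive lines into maximal same-kind blocks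
--     lines = text.splitlines()
--     blocks = []
--     while lines:
--         t = is_table(lines[0])
--         i = 1
--         while i < len(lines) and is_table(lines[i]) == t:
--             i += 1
--         blocks.append((t, lines[:i]))
--         lines = lines[i:]
--
--     # stage 2: emit the blocks; blocks alternate, so a separator goes before a
--     # table block whose predecessor ends non-blank, and before a non-table
--     # block that itself starts non-blank
--     out = []
--     prev_blk = None
--     for t, blk in blocks:
--         if prev_blk is not None:
--             checked = prev_blk[-1] if t else blk[0]
--             if checked.strip():
--                 out.append("")
--         out.extend(line.rstrip() for line in blk)
--         prev_blk = blk
--     return "\n".join(out)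
-- ===== Notes on version B (the rewrite author's own statement) =====
-- stated objective: alternative
-- what changed: A's single stateful pass (in_table flag, lookback into out[-1]) is replaced by a two-stage block algorithm: stage 1 groups the lines into maximal table/non-table blocks, stage 2 emits whole blocks and decides each blank separator at a block boundary from the boundary block's edge lines.
import Mathlib
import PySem

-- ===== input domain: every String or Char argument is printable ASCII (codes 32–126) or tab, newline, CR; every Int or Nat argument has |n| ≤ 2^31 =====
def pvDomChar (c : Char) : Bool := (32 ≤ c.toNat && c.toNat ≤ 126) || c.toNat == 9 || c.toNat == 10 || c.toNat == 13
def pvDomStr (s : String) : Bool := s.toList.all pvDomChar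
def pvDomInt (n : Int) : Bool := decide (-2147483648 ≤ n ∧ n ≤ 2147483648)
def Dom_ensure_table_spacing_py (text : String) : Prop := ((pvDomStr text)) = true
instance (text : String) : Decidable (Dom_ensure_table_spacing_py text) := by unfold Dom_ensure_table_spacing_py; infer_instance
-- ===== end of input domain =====

-- B replaces A's stateful single pass by a two-stage block algorithm: group the
-- lines into maximal table/non-table blocks, then emit blocks with blank
-- separators at block boundaries (objective: alternative decomposition, same cost).

-- ===== PORT A =====
-- truthiness of Python's `out and out[-1].strip()`
def pvALastNonblank (out : List String) : Bool :=
  match out.getLast? with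
  | none => false
  | some l => PySem.Str.strip l != ""

-- one iteration of A's for-loop; state = (out, in_table)
def pvAStep (s : List String × Bool) (line : String) : List String × Bool :=
  let stripped := PySem.Str.strip line
  let is_table_line := PySem.Str.startswith stripped "|"
  if is_table_line then
    let out := if !s.2 then (if pvALastNonblank s.1 then s.1 ++ [""] else s.1) else s.1
    (out ++ [PySem.Str.rstrip line], true)
  else
    let out := if s.2 then
        (if stripped != "" && pvALastNonblank s.1 then s.1 ++ [""] else s.1)
      else s.1
    (out ++ [PySem.Str.rstrip line], false)

def ensure_table_spacing_py (text : String) : String :=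
  PySem.Str.join "\n" (((PySem.Str.splitlines text).foldl pvAStep ([], false)).1)

-- ===== PORT B =====
def pvIsTable (line : String) : Bool :=
  PySem.Str.startswith (PySem.Str.strip line) "|"

-- stage 1: group consecutive lines into maximal same-kind blocks
def pvBlocks : List String → List (Bool × List String)
  | [] => []
  | l :: ls =>
    let t := pvIsTable l
    (t, l :: ls.takeWhile (fun x => pvIsTable x == t)) ::
      pvBlocks (ls.dropWhile (fun x => pvIsTable x == t))
termination_by xs => xs.length
decreasing_by
  simpa using Nat.lt_succ_of_le (List.length_dropWhile_le _ _)

-- stage 2: B's emit loop; `prev` is the block emitted in the previous iteration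
def pvEmit (prev : Option (List String)) : List (Bool × List String) → List String
  | [] => []
  | (t, blk) :: rest =>
    (match prev with
     | none => []
     | some pb =>
       let checked := if t then pb.getLastD "" else blk.headD ""
       if PySem.Str.strip checked != "" then [""] else []) ++
    blk.map PySem.Str.rstrip ++ pvEmit (some blk) rest

def ensure_table_spacing_py_alt (text : String) : String :=
  PySem.Str.join "\n" (pvEmit none (pvBlocks (PySem.Str.splitlines text)))

-- ===== PRECONDITION & SPEC =====
def Spec_ensure_table_spacing_py (text : String) (out : String) : Prop := out = ensure_table_spacing_py_alt text
instance (text : String) (out : String) : Decidable (Spec_ensure_table_spacing_py text out) := by unfold Spec_ensure_table_spacing_py; infer_instance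

-- ===== CLAIM (what is proved, stated in full; the proofs are below) =====
def Claim_equal_ensure_table_spacing_py : Prop := ∀ (text : String), Dom_ensure_table_spacing_py text → Spec_ensure_table_spacing_py text (ensure_table_spacing_py text)

-- ===== LEMMAS AND PROOFS =====

-- proof-only intermediate: the lines A's loop emits after line p, described pairwise
def pvPair (p : String) : List String → List String
  | [] => []
  | c :: cs =>
    (if pvIsTable p != pvIsTable c then
       (if PySem.Str.strip (if pvIsTable c then p else c) != "" then [""] else [])
     else []) ++ (PySem.Str.rstrip c :: pvPair c cs)

lemma all_dropWhile_iff (p : Char → Bool) (l : List Char) :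
    (∀ c ∈ List.dropWhile p l, p c) ↔ ∀ c ∈ l, p c := by
  constructor
  · intro h c hc
    rw [← List.takeWhile_append_dropWhile (p := p) (l := l)] at hc
    rcases List.mem_append.1 hc with h1 | h2
    · exact List.mem_takeWhile_imp h1
    · exact h c h2
  · intro h c hc
    exact h c ((List.dropWhile_sublist _).mem hc)

lemma pv_rstrip_nil_iff (l : List Char) :
    PySem.Chars.rstrip l = [] ↔ ∀ c ∈ l, PySem.Chars.isspace c := by
  unfold PySem.Chars.rstrip
  rw [List.reverse_eq_nil_iff, List.dropWhile_eq_nil_iff]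
  simp

lemma pv_strip_nil_iff (l : List Char) :
    PySem.Chars.strip l = [] ↔ ∀ c ∈ l, PySem.Chars.isspace c := by
  unfold PySem.Chars.strip PySem.Chars.lstrip
  rw [pv_rstrip_nil_iff, all_dropWhile_iff]

lemma pv_all_rstrip_iff (l : List Char) :
    (∀ c ∈ PySem.Chars.rstrip l, PySem.Chars.isspace c) ↔ ∀ c ∈ l, PySem.Chars.isspace c := by
  unfold PySem.Chars.rstrip
  constructor
  · intro h c hc
    have := (all_dropWhile_iff PySem.Chars.isspace l.reverse).1 (by simpa using h)
    exact this c (by simpa using hc)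
  · intro h c hc
    simp only [List.mem_reverse] at hc
    exact h c (by simpa using (List.dropWhile_sublist _).mem hc)

lemma pv_str_eq_empty_iff (s : String) : s = "" ↔ s.toList = [] := by
  constructor
  · rintro rfl; rfl
  · intro h; exact String.ext (by simpa [String.toList] using h)

-- `.strip()` of a line and of its `.rstrip()` are blank together
lemma pv_strip_rstrip_nil_iff (l : String) :
    (PySem.Str.strip (PySem.Str.rstrip l) = "") ↔ (PySem.Str.strip l = "") := by
  rw [pv_str_eq_empty_iff, pv_str_eq_empty_iff]
  simp only [PySem.Str.toList_strip, PySem.Str.toList_rstrip]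
  rw [pv_strip_nil_iff, pv_strip_nil_iff, pv_all_rstrip_iff]

-- a table line strips to something non-empty (it starts with '|')
lemma pv_isTable_strip_ne (l : String) (h : pvIsTable l = true) :
    PySem.Str.strip l ≠ "" := by
  intro he
  unfold pvIsTable at h
  rw [he] at h
  simp [PySem.Str.startswith] at h
  revert h; decide

-- A's `out[-1].strip()` test, when out ends with an rstripped line, reads that line
lemma pvALast (out0 : List String) (p : String) :
    pvALastNonblank (out0 ++ [PySem.Str.rstrip p]) = (PySem.Str.strip p != "") := by
  unfold pvALastNonblank
  rw [List.getLast?_concat]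
  by_cases h : PySem.Str.strip p = ""
  · have h2 : PySem.Str.strip (PySem.Str.rstrip p) = "" := (pv_strip_rstrip_nil_iff p).2 h
    simp [h, h2]
  · have h2 : PySem.Str.strip (PySem.Str.rstrip p) ≠ "" := fun hh => h ((pv_strip_rstrip_nil_iff p).1 hh)
    show (PySem.Str.strip (PySem.Str.rstrip p) != "") = (PySem.Str.strip p != "")
    rw [bne_iff_ne.2 h2, bne_iff_ne.2 h]

-- after the previous line p has been emitted, one A-step emits pvPair's head piece
lemma pv_stepA_eq (p c : String) (out0 : List String) :
    pvAStep (out0 ++ [PySem.Str.rstrip p], pvIsTable p) c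
      = ((out0 ++ [PySem.Str.rstrip p])
          ++ ((if pvIsTable p != pvIsTable c then
                 (if PySem.Str.strip (if pvIsTable c then p else c) != "" then [""] else [])
               else []) ++ [PySem.Str.rstrip c]),
         pvIsTable c) := by
  unfold pvAStep
  simp only []
  rw [pvALast]
  have h0 : PySem.Chars.startswith [] ['|'] = false := by decide
  by_cases hc : pvIsTable c <;>
  by_cases hp : pvIsTable p
  · simp [pvIsTable] at hc hp
    simp [hc, hp, pvIsTable]
  · simp [pvIsTable] at hc hp
    by_cases hsp : PySem.Str.strip p = "" <;>
      simp [hc, hp, hsp, pvIsTable, h0]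
  · have hsp := pv_isTable_strip_ne p hp
    simp [pvIsTable] at hc hp
    by_cases hsc : PySem.Str.strip c = "" <;>
      simp [hc, hp, hsp, hsc, pvIsTable, h0]
  · simp [pvIsTable] at hc hp
    simp [hc, hp, pvIsTable]

-- loop invariant: A's remaining loop, started just after emitting line p, appends pvPair
lemma pv_key (rest : List String) (p : String) (out0 : List String) :
    (rest.foldl pvAStep (out0 ++ [PySem.Str.rstrip p], pvIsTable p)).1
      = (out0 ++ [PySem.Str.rstrip p]) ++ pvPair p rest := by
  induction rest generalizing p out0 with
  | nil => simp [pvPair]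
  | cons c rest' ih =>
    simp only [List.foldl_cons]
    rw [pv_stepA_eq]
    have h1 := ih c (out0 ++ [PySem.Str.rstrip p]
        ++ (if pvIsTable p != pvIsTable c then
              (if PySem.Str.strip (if pvIsTable c then p else c) != "" then [""] else [])
            else []))
    rw [show (out0 ++ [PySem.Str.rstrip p]
          ++ ((if pvIsTable p != pvIsTable c then
                 (if PySem.Str.strip (if pvIsTable c then p else c) != "" then [""] else [])
               else []) ++ [PySem.Str.rstrip c]))
        = ((out0 ++ [PySem.Str.rstrip p]
            ++ (if pvIsTable p != pvIsTable c then
                  (if PySem.Str.strip (if pvIsTable c then p else c) != "" then [""] else [])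
                else [])) ++ [PySem.Str.rstrip c]) by simp [List.append_assoc]]
    rw [h1]
    simp [pvPair, List.append_assoc]

-- A's first iteration (out = [], in_table = False) just emits the rstripped first line
lemma pv_stepA_first (c : String) :
    pvAStep ([], false) c = ([PySem.Str.rstrip c], pvIsTable c) := by
  unfold pvAStep pvALastNonblank pvIsTable
  by_cases hc : PySem.Chars.startswith (PySem.Chars.strip c.toList) ['|'] = true <;> simp [hc]

-- inside a same-kind run, pvPair inserts nothing and just rstrips
lemma pv_pair_run (run : List String) (p : String) (rest : List String)
    (h : ∀ c ∈ run, pvIsTable c = pvIsTable p) :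
    pvPair p (run ++ rest)
      = run.map PySem.Str.rstrip ++ pvPair ((p :: run).getLastD "") rest := by
  induction run generalizing p with
  | nil => simp
  | cons c run' ih =>
    have hc : pvIsTable c = pvIsTable p := h c (by simp)
    have h' : ∀ x ∈ run', pvIsTable x = pvIsTable c := by
      intro x hx; rw [hc]; exact h x (by simp [hx])
    have hb : (pvIsTable p != pvIsTable c) = false := by simp [hc]
    simp only [List.cons_append, pvPair, hb, Bool.false_eq_true, if_false,
      List.nil_append, List.map_cons]
    rw [ih c h']
    simp

lemma pv_dropWhile_head {q : String → Bool} {l : List String} {d : String}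
    (h : (List.dropWhile q l).head? = some d) : q d = false := by
  induction l with
  | nil => simp [List.dropWhile] at h
  | cons x xs ih =>
    by_cases hx : q x
    · rw [List.dropWhile_cons_of_pos hx] at h; exact ih h
    · rw [List.dropWhile_cons_of_neg hx] at h
      simp at h; rw [← h]; simpa using hx

lemma pv_getLastD_table (c : String) (run : List String)
    (h : ∀ x ∈ run, pvIsTable x = pvIsTable c) :
    pvIsTable ((c :: run).getLastD "") = pvIsTable c := by
  induction run generalizing c with
  | nil => rfl
  | cons x xs ih =>
    have hx : pvIsTable x = pvIsTable c := h x (by simp)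
    have := ih x (fun y hy => by rw [hx]; exact h y (by simp [hy]))
    simpa [hx] using this

-- block emission after a previous block equals the pairwise description
lemma pv_emit_pair : ∀ (n : ℕ) (rest prevBlk : List String), rest.length ≤ n →
    (∀ d, rest.head? = some d → pvIsTable d ≠ pvIsTable (prevBlk.getLastD "")) →
    pvEmit (some prevBlk) (pvBlocks rest) = pvPair (prevBlk.getLastD "") rest := by
  intro n
  induction n with
  | zero =>
    intro rest prevBlk hn _
    have : rest = [] := List.length_eq_zero_iff.1 (Nat.le_zero.1 hn)
    subst this
    simp [pvBlocks, pvEmit, pvPair]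
  | succ m ih =>
    intro rest prevBlk hn hhead
    cases rest with
    | nil => simp [pvBlocks, pvEmit, pvPair]
    | cons c cs =>
      have hb : pvIsTable c ≠ pvIsTable (prevBlk.getLastD "") := hhead c rfl
      set t := pvIsTable c with ht
      set run := cs.takeWhile (fun x => pvIsTable x == t) with hrun
      set rest' := cs.dropWhile (fun x => pvIsTable x == t) with hrest'
      have hrunmem : ∀ x ∈ run, pvIsTable x = t := by
        intro x hx
        have := List.mem_takeWhile_imp (hrun ▸ hx)
        simpa using this
      have hsplit : run ++ rest' = cs := by
        rw [hrun, hrest']; exact List.takeWhile_append_dropWhile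
      have hlen : rest'.length ≤ m := by
        have h1 : rest'.length ≤ cs.length := hrest' ▸ List.length_dropWhile_le _ _
        have h2 : cs.length ≤ m := by simpa using Nat.succ_le_succ_iff.1 hn
        omega
      have hblocks : pvBlocks (c :: cs) = (t, c :: run) :: pvBlocks rest' := by
        rw [pvBlocks]
      rw [hblocks]
      have hlast : pvIsTable ((c :: run).getLastD "") = t :=
        pv_getLastD_table c run hrunmem
      have hih := ih rest' (c :: run) hlen (by
        intro d hd
        have := pv_dropWhile_head (hrest' ▸ hd)
        rw [hlast]
        simpa using this)
      -- unfold one step of pvEmit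
      show ((let checked := if t then prevBlk.getLastD "" else (c :: run).headD "";
             if PySem.Str.strip checked != "" then [""] else []) ++
            (c :: run).map PySem.Str.rstrip ++ pvEmit (some (c :: run)) (pvBlocks rest'))
          = pvPair (prevBlk.getLastD "") (c :: cs)
      rw [hih, ← hsplit]
      rw [show pvPair (prevBlk.getLastD "") (c :: (run ++ rest'))
            = (if pvIsTable (prevBlk.getLastD "") != pvIsTable c then
                 (if PySem.Str.strip (if pvIsTable c then prevBlk.getLastD "" else c) != "" then [""] else [])
               else []) ++ (PySem.Str.rstrip c :: pvPair c (run ++ rest')) from rfl]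
      rw [pv_pair_run run c rest' hrunmem]
      have hbne : (pvIsTable (prevBlk.getLastD "") != pvIsTable c) = true := by
        simpa [bne_iff_ne] using (Ne.symm hb)
      rw [hbne]
      simp only [if_true, ← ht]
      cases t <;> simp

-- ===== VERDICT (by name: the statement is the Claim_ definition above) =====
theorem ensure_table_spacing_py_spec : Claim_equal_ensure_table_spacing_py := by
  intro text _
  unfold Spec_ensure_table_spacing_py ensure_table_spacing_py ensure_table_spacing_py_alt
  cases h : PySem.Str.splitlines text with
  | nil => simp [pvBlocks, pvEmit]
  | cons c cs =>
    congr 1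
    simp only [List.foldl_cons, pv_stepA_first]
    have hA : ((cs.foldl pvAStep ([PySem.Str.rstrip c], pvIsTable c)).1)
        = [PySem.Str.rstrip c] ++ pvPair c cs := by
      simpa using pv_key cs c []
    rw [hA]
    set t := pvIsTable c with ht
    set run := cs.takeWhile (fun x => pvIsTable x == t) with hrun
    set rest' := cs.dropWhile (fun x => pvIsTable x == t) with hrest'
    have hrunmem : ∀ x ∈ run, pvIsTable x = t := by
      intro x hx
      have := List.mem_takeWhile_imp (hrun ▸ hx)
      simpa using this
    have hsplit : run ++ rest' = cs := by
      rw [hrun, hrest']; exact List.takeWhile_append_dropWhile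
    have hblocks : pvBlocks (c :: cs) = (t, c :: run) :: pvBlocks rest' := by
      rw [pvBlocks]
    rw [hblocks]
    have hlast : pvIsTable ((c :: run).getLastD "") = t :=
      pv_getLastD_table c run hrunmem
    have hemit := pv_emit_pair rest'.length rest' (c :: run) le_rfl (by
      intro d hd
      have := pv_dropWhile_head (hrest' ▸ hd)
      rw [hlast]
      simpa using this)
    show [PySem.Str.rstrip c] ++ pvPair c cs
        = [] ++ (c :: run).map PySem.Str.rstrip ++ pvEmit (some (c :: run)) (pvBlocks rest')
    rw [hemit, ← hsplit, pv_pair_run run c rest' hrunmem]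
    simp
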